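-- pv_equiv track=rewrite | github.com/kncarrier28-uky-coursework/CS378-HW4 | Problem1.py | separateCipher
-- ===== SOURCE A (Python) =====
-- def separateCipher(cipher, keyLength):
--     separateStrings = []
--     for i in range(keyLength):
--         newString = ""
--         for j in range(i, len(cipher) - 1, keyLength):
--             newString += cipher[j]
--         separateStrings.append(newString)
--     return separateStrings
-- ===== SOURCE B (Python) =====
-- def separateCipher(cipher, keyLength):
--     buckets = ["" for _ in range(keyLength)]
--     if keyLength > 0:
--         for j in range(len(cipher) - 1):
--             buckets[j % keyLength] += cipher[j]
--     return buckets
-- ===== Notes on version B (the rewrite author's own statement) =====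
-- stated objective: alternative
-- what changed: Instead of A's per-column nested stride loops (one pass over the cipher per key position), B builds all keyLength buckets up front and fans each character into its column in a single left-to-right scan using j % keyLength.
import Mathlib
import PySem

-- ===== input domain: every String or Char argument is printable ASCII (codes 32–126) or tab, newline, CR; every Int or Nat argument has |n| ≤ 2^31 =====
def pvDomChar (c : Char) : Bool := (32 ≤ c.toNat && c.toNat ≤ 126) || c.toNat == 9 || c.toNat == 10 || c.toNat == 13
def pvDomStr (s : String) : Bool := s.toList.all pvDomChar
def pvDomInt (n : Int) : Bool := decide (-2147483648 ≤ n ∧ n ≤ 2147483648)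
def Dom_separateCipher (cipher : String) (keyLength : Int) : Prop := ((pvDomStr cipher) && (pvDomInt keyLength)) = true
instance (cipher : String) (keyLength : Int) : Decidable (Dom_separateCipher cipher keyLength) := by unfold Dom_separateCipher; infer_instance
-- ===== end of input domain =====

-- B replaces A's per-column stride loops by one bucket-fanning scan over the cipher (alternative decomposition, same cost).
-- Strings are handled as their code-point lists (PySem.Chars style) and wrapped with String.mk; same values as Python.

-- ===== PORT A =====
def separateCipher (cipher : String) (keyLength : Int) : List String :=
  (PySem.List.pyRange 0 keyLength 1).foldl
    (fun separateStrings i =>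
      separateStrings ++
        [String.mk
          ((PySem.List.pyRange i (PySem.Str.len cipher - 1) keyLength).foldl
            (fun newString j => newString ++ [PySem.List.pyGetD cipher.toList j ' ']) [])])
    []

-- ===== PORT B =====
def separateCipher_alt (cipher : String) (keyLength : Int) : List String :=
  let buckets := (PySem.List.pyRange 0 keyLength 1).map (fun _ => ([] : List Char))
  let buckets :=
    if keyLength > 0 then
      (PySem.List.pyRange 0 (PySem.Str.len cipher - 1) 1).foldl
        (fun b j =>
          PySem.List.pySetD b (PySem.Int.mod j keyLength)
            (PySem.List.pyGetD b (PySem.Int.mod j keyLength) [] ++ [PySem.List.pyGetD cipher.toList j ' ']))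
        buckets
    else buckets
  buckets.map String.mk

-- ===== PRECONDITION & SPEC =====
def Spec_separateCipher (cipher : String) (keyLength : Int) (out : List String) : Prop := out = separateCipher_alt cipher keyLength
instance (cipher : String) (keyLength : Int) (out : List String) : Decidable (Spec_separateCipher cipher keyLength out) := by unfold Spec_separateCipher; infer_instance

-- ===== CLAIM (what is proved, stated in full; the proofs are below) =====
def Claim_equal_separateCipher : Prop := ∀ (cipher : String) (keyLength : Int), Dom_separateCipher cipher keyLength → Spec_separateCipher cipher keyLength (separateCipher cipher keyLength)

-- ===== LEMMAS AND PROOFS =====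

-- bucket i's content after scanning indices 0 ≤ j < t: the characters whose index is ≡ i (mod k)
def colF (cs : List Char) (k t i : Int) : List Char :=
  ((PySem.List.pyRange 0 t 1).filter (fun j => PySem.Int.mod j k == i)).map
    (fun j => PySem.List.pyGetD cs j ' ')

theorem pymod_eq_emod (a k : Int) (hk : 0 < k) : PySem.Int.mod a k = a % k := by
  simp [PySem.Int.mod, Int.fmod_eq_emod_of_nonneg _ (le_of_lt hk)]

theorem pymod_eq_iff (x i k : Int) (hk : 0 < k) (hi0 : 0 ≤ i) (hik : i < k) :
    PySem.Int.mod x k = i ↔ k ∣ x - i := by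
  rw [pymod_eq_emod _ _ hk]
  constructor
  · intro h
    exact ⟨x / k, by have h2 := Int.emod_add_ediv x k; omega⟩
  · rintro ⟨q, hq⟩
    have hx : x = i + k * q := by omega
    rw [hx, Int.add_mul_emod_self_left, Int.emod_eq_of_lt hi0 hik]

-- A's stride range equals the filtered full range
theorem stride_eq_filter (k i t : Int) (hk : 0 < k) (hi0 : 0 ≤ i) (hik : i < k) :
    PySem.List.pyRange i t k
      = (PySem.List.pyRange 0 t 1).filter (fun j => PySem.Int.mod j k == i) := by
  have hpwL : (PySem.List.pyRange i t k).Pairwise (· < ·) := by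
    rw [PySem.List.pyRange_of_pos _ _ hk]
    refine List.Pairwise.map _ ?_ (List.pairwise_lt_range)
    intro a b hab
    have h1 : (a : Int) < b := by exact_mod_cast hab
    nlinarith
  have hpwR : ((PySem.List.pyRange 0 t 1).filter (fun j => PySem.Int.mod j k == i)).Pairwise (· < ·) :=
    (PySem.List.pairwise_lt_pyRange_one 0 t).filter _
  refine List.eq_of_perm_of_sorted (fun a b _ _ h1 h2 => absurd h2 (lt_asymm h1)) hpwL hpwR ?_
  rw [List.perm_ext_iff_of_nodup (hpwL.imp ne_of_lt) (hpwR.imp ne_of_lt)]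
  intro x
  rw [PySem.List.mem_pyRange_iff_of_pos hk, List.mem_filter, PySem.List.mem_pyRange_one,
    beq_iff_eq, pymod_eq_iff x i k hk hi0 hik]
  constructor
  · rintro ⟨h1, h2, h3⟩
    exact ⟨⟨le_trans hi0 h1, h2⟩, h3⟩
  · rintro ⟨⟨h0, h2⟩, q, hq⟩
    refine ⟨?_, h2, q, hq⟩
    by_cases hq0 : 0 ≤ q
    · nlinarith
    · have hq1 : q ≤ -1 := by omega
      nlinarith

theorem set_map_range {α : Type} (K : Nat) (f : Nat → α) (p : Nat) (_hp : p < K) (v : α) :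
    ((List.range K).map f).set p v = (List.range K).map (fun t => if t = p then v else f t) := by
  apply List.ext_getElem
  · simp
  · intro n h1 h2
    simp only [List.getElem_set, List.getElem_map, List.getElem_range]
    rcases eq_or_ne p n with h | h
    · simp [h]
    · rw [if_neg h, if_neg (Ne.symm h)]

theorem bucket_inv (cs : List Char) (k : Int) (hk : 0 < k) (m : Nat) :
    (PySem.List.pyRange 0 (m : Int) 1).foldl
      (fun b j => PySem.List.pySetD b (PySem.Int.mod j k)
          (PySem.List.pyGetD b (PySem.Int.mod j k) [] ++ [PySem.List.pyGetD cs j ' ']))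
      ((PySem.List.pyRange 0 k 1).map (fun _ => ([] : List Char)))
    = (PySem.List.pyRange 0 k 1).map (fun i => colF cs k (m : Int) i) := by
  induction m with
  | zero =>
      simp [colF, PySem.List.pyRange_one_eq_nil (le_refl (0 : Int))]
  | succ m ih =>
      have hcast : ((m + 1 : Nat) : Int) = (m : Int) + 1 := by push_cast; ring
      rw [hcast, PySem.List.pyRange_one_succ_right (by positivity), List.foldl_append, ih]
      set p := PySem.Int.mod (m : Int) k with hpdef
      have hp0 : 0 ≤ p := by rw [hpdef, pymod_eq_emod _ _ hk]; exact Int.emod_nonneg _ (by omega)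
      have hpk : p < k := by rw [hpdef, pymod_eq_emod _ _ hk]; exact Int.emod_lt_of_pos _ hk
      have hPK : p.toNat < k.toNat := by omega
      have hPcast : ((p.toNat : Nat) : Int) = p := Int.toNat_of_nonneg hp0
      have hrange : PySem.List.pyRange 0 k 1 = List.map (fun n : Nat => (n : Int)) (List.range k.toNat) := by
        rw [PySem.List.pyRange_one]
        simp only [Int.sub_zero, zero_add]
      rw [List.foldl_cons, List.foldl_nil, hrange, List.map_map, List.map_map]
      have hget : PySem.List.pyGetD (List.map ((fun i => colF cs k (m : Int) i) ∘ fun n : Nat => (n : Int)) (List.range k.toNat)) p []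
          = colF cs k (m : Int) p := by
        rw [← hPcast, PySem.List.pyGetD_natCast,
          List.getD_eq_getElem _ _ (by simpa using hPK)]
        simp only [List.getElem_map, List.getElem_range, Function.comp_apply]
      rw [hget, PySem.List.pySetD_of_nonneg _ _ hp0,
        set_map_range k.toNat _ p.toNat hPK _]
      have hsucc : ∀ i : Int, colF cs k ((m : Int) + 1) i
          = colF cs k (m : Int) i
            ++ (if p == i then [PySem.List.pyGetD cs (m : Int) ' '] else []) := by
        intro i
        unfold colF
        rw [PySem.List.pyRange_one_succ_right (by positivity), List.filter_append, List.map_append]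
        congr 1
        simp only [List.filter, ← hpdef]
        rcases h : (p == i) with _ | _ <;> simp [h]

      refine List.map_congr_left ?_
      intro t ht
      simp only [Function.comp_apply]
      rcases eq_or_ne t p.toNat with h | h
      · subst h
        rw [if_pos rfl, hPcast, hsucc p, if_pos (beq_self_eq_true p)]
      · rw [if_neg h, hsucc (t : Int)]
        have hbeq : (p == (t : Int)) = false := by
          rw [beq_eq_false_iff_ne]
          intro hc; exact h (by omega)
        rw [hbeq, if_neg (by simp), List.append_nil]

-- ===== VERDICT (by name: the statement is the Claim_ definition above) =====
theorem separateCipher_spec : Claim_equal_separateCipher := by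
  intro cipher k _
  unfold Spec_separateCipher separateCipher separateCipher_alt
  rw [PySem.List.foldl_append_singleton_eq_map
      (fun i => String.mk ((PySem.List.pyRange i (PySem.Str.len cipher - 1) k).foldl
        (fun newString j => newString ++ [PySem.List.pyGetD cipher.toList j ' ']) []))]
  by_cases hk : k > 0
  · simp only [if_pos hk]
    have hA : ∀ i ∈ PySem.List.pyRange 0 k 1,
        String.mk ((PySem.List.pyRange i (PySem.Str.len cipher - 1) k).foldl
          (fun newString j => newString ++ [PySem.List.pyGetD cipher.toList j ' ']) [])
        = String.mk (colF cipher.toList k (PySem.Str.len cipher - 1) i) := by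
      intro i hi
      rw [PySem.List.mem_pyRange_one] at hi
      rw [PySem.List.foldl_append_singleton_eq_map, List.nil_append,
        stride_eq_filter k i _ hk hi.1 hi.2]
      rfl
    rw [List.nil_append, List.map_congr_left hA]
    rcases hn : cipher.toList.length with _ | m
    · have hb : PySem.Str.len cipher - 1 = (-1 : Int) := by simp [hn]
      rw [hb]
      simp [colF, PySem.List.pyRange_one_eq_nil (by norm_num : (-1 : Int) ≤ 0)]
    · have hb : PySem.Str.len cipher - 1 = (m : Int) := by simp [hn]
      rw [hb, bucket_inv cipher.toList k hk m, List.map_map]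
      rfl
  · rw [PySem.List.pyRange_one_eq_nil (by omega : k ≤ 0)]
    simp [hk]
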